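-- pv_equiv track=rewrite | github.com/aliwo/swblog | _drafts/traverse_right.py | traverse_left
-- ===== SOURCE A (Python) =====
-- def traverse_left(done, i):
--     cnt = 0
--
--     for _ in range(len(done)):
--         if done[i] == False:
--             break
--         i = i - 1 if i > 0 else len(done) - 1
--         cnt += 1
--
--     if cnt == len(done): # 못 찾았다는 뜻
--         return 0
--
--     done[i] = True
--     cnt += traverse_left(done, i)
--     done[i] = False
--     return cnt
-- ===== SOURCE B (Python) =====
-- def traverse_left(done, i):
--     n = len(done)
--     if n == 0:
--         return 0
--     best = 0
--     for j, d in enumerate(done):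
--         if not d:
--             best = max(best, (i - j) % n)
--     return best
-- ===== Notes on version B (the rewrite author's own statement) =====
-- stated objective: faster
-- what changed: Replaces the recursive walk (re-scanning the circle once per False entry, with temporary in-place marking) by one pass that takes the maximum of the circular leftward distance (i - j) % n over all False positions j.
-- intended difference: For -len(done) < i < 0 with a False at a position other than i % len(done), A's walk reads done[i] with negative-index wraparound but then jumps to len(done)-1, skipping the cells left of i % len(done) (returning e.g. 0 on ([False,True],-1) and missing the False at index 0), while B returns the maximum circular leftward distance (i - j) % len(done) over False positions (1 there), the intended circular semantics. — e.g. on traverse_left([false, true], -1): A returns 0, B returns 1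
import Mathlib
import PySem

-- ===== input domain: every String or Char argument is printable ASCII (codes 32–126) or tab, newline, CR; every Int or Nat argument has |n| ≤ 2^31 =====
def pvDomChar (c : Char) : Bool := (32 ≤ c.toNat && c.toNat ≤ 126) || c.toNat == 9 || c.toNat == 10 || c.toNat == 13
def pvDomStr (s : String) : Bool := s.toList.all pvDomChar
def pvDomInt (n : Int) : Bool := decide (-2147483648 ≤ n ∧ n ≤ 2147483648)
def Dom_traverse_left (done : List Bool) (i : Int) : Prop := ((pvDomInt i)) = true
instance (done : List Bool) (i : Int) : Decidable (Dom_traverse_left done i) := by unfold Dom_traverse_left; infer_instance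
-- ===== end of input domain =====

-- B replaces A's repeated recursive circular walk by one O(n) pass taking the maximum of
-- (i - j) % n over the False positions j. A's temporary in-place marking of `done` is always
-- undone before A returns, so A has no net side effect on its argument.

-- ===== PORT A =====
-- A's for-loop: fuel iterations; state (i, cnt); breaks when done[i] == False.
-- On IndexError (pyGet? = none, impossible inside Pre_) it exhausts the fuel, which makes the
-- caller return 0; Python raises there, and those inputs are outside Pre_.
def pvLoopA (done : List Bool) : Nat → Int → Int → Int × Int
  | 0, i, cnt => (i, cnt)
  | f+1, i, cnt =>
    match PySem.List.pyGet? done i with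
    | none => (i, cnt + (f+1))
    | some b =>
      if b = false then (i, cnt)
      else pvLoopA done f (if i > 0 then i - 1 else (done.length : Int) - 1) (cnt + 1)


-- the next three lemmas are cited by traverse_left's decreasing_by, so they stay above the port
-- termination helper for traverse_left: if the loop did not exhaust its fuel, it stopped on a False cell
theorem pvLoopA_stop (done : List Bool) : ∀ (f : Nat) (i cnt : Int),
    (pvLoopA done f i cnt).2 ≠ cnt + f →
    PySem.List.pyGet? done (pvLoopA done f i cnt).1 = some false := by
  intro f
  induction f with
  | zero => intro i cnt h; simp [pvLoopA] at h
  | succ f ih =>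
    intro i cnt h
    simp only [pvLoopA] at h ⊢
    cases hg : PySem.List.pyGet? done i with
    | none =>
      exfalso; simp only [hg] at h; apply h; push_cast; ring
    | some b =>
      simp only [hg] at h ⊢
      by_cases hb : b = false
      · simp [hb, hg]
      · simp only [if_neg hb] at h ⊢
        exact ih _ _ (fun hc => h (by rw [hc]; push_cast; ring))

theorem pvWrap_lt (done : List Bool) (i : Int)
    (h : PySem.List.pyGet? done i = some false) :
    ((if i < 0 then i + done.length else i).toNat < done.length) ∧
      done[(if i < 0 then i + done.length else i).toNat]! = false := by
  unfold PySem.List.pyGet? PySem.List.pyIdx? at h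
  split_ifs at h with h0 hlt hneg
  · -- 0 ≤ i < len : index i.toNat
    simp only [Option.bind_some] at h
    obtain ⟨hk, hv⟩ := List.getElem?_eq_some_iff.mp h
    rw [if_neg (by omega)]
    exact ⟨hk, by simp [List.getElem!_eq_getElem?_getD, h]⟩
  · simp at h
  · -- -len ≤ i < 0 : index len - (-i).toNat
    simp only [Option.bind_some] at h
    obtain ⟨hk, hv⟩ := List.getElem?_eq_some_iff.mp h
    have heq : (i + done.length).toNat = done.length - (-i).toNat := by omega
    rw [if_pos (by omega), heq]
    exact ⟨hk, by simp [List.getElem!_eq_getElem?_getD, h]⟩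
  · simp at h

theorem pvCount_set_lt (done : List Bool) (j : Nat) (hj : j < done.length)
    (hf : done[j]! = false) : (done.set j true).count false < done.count false := by
  have hget : done[j] = false := by
    simpa [List.getElem!_eq_getElem?_getD, List.getElem?_eq_getElem hj] using hf
  have hcs := List.count_set (a := true) (b := false) (l := done) (i := j) hj
  have hpos : 0 < done.count false := by
    refine List.count_pos_iff.mpr ?_
    exact hget ▸ List.getElem_mem hj
  simp [hget] at hcs
  omega

def traverse_left (done : List Bool) (i : Int) : Int :=
  let r := pvLoopA done done.length i 0
  if r.2 = (done.length : Int) then 0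
  else
    let j : Nat := (if r.1 < 0 then r.1 + done.length else r.1).toNat
    r.2 + traverse_left (done.set j true) r.1
termination_by done.count false
decreasing_by
  rename_i hne
  have hs := pvLoopA_stop done done.length i 0
    (by intro hc; apply hne; rw [hc]; push_cast; ring)
  have hw := pvWrap_lt done (pvLoopA done done.length i 0).1 hs
  exact pvCount_set_lt done _ hw.1 hw.2


-- ===== PORT B =====
def traverse_left_alt (done : List Bool) (i : Int) : Int :=
  let n : Int := done.length
  if n = 0 then 0
  else (PySem.List.enumerate done 0).foldl
    (fun best jd => if jd.2 = false then max best (PySem.Int.mod (i - jd.1) n) else best) 0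


-- ===== PRECONDITION & SPEC =====
-- Pre_ is exactly the inputs on which Python A returns: an empty list, or -len(done) <= i < len(done);
-- outside it A raises IndexError on its first done[i].
def Pre_traverse_left (done : List Bool) (i : Int) : Prop :=
  done = [] ∨ (-(done.length : Int) ≤ i ∧ i < (done.length : Int))
instance (done : List Bool) (i : Int) : Decidable (Pre_traverse_left done i) := by
  unfold Pre_traverse_left; infer_instance

def pvWitness_traverse_left : List Bool × Int := ([true, false, true], 1)

-- For -len(done) < i < 0 with a False entry at some position other than i + len(done), A returns the
-- count of a walk that reads done[i] with Python's negative-index wraparound but then jumps to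
-- len(done)-1, skipping the cells left of i mod len(done) and possibly missing a False at index 0
-- (e.g. 0 on ([False, True], -1)), while B returns the maximum circular leftward distance
-- (i - j) % len(done) over the False positions (1 there), the intended circular semantics.
def D_traverse_left (done : List Bool) (i : Int) : Prop :=
  -(done.length : Int) < i ∧ i < 0 ∧
    ∃ k : Nat, k < done.length ∧ done[k]! = false ∧ (k : Int) ≠ i + done.length
instance (done : List Bool) (i : Int) : Decidable (D_traverse_left done i) := by
  unfold D_traverse_left; infer_instance

def Spec_traverse_left (done : List Bool) (i : Int) (out : Int) : Prop := ¬ D_traverse_left done i → out = traverse_left_alt done i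
instance (done : List Bool) (i : Int) (out : Int) : Decidable (Spec_traverse_left done i out) := by
  unfold Spec_traverse_left; infer_instance

def pvDiffWitness_traverse_left : List Bool × Int := ([false, true], -1)
def pvDiffWitnessOut_traverse_left : Int × Int := (0, 1)

-- ===== CLAIM (what is proved, stated in full; the proofs are below) =====
def Claim_unchanged_traverse_left : Prop := ∀ (done : List Bool) (i : Int), Dom_traverse_left done i → Pre_traverse_left done i → Spec_traverse_left done i (traverse_left done i)

def Claim_changed_traverse_left : Prop := Dom_traverse_left (pvDiffWitness_traverse_left.1) (pvDiffWitness_traverse_left.2) ∧ Pre_traverse_left (pvDiffWitness_traverse_left.1) (pvDiffWitness_traverse_left.2) ∧ D_traverse_left (pvDiffWitness_traverse_left.1) (pvDiffWitness_traverse_left.2) ∧ traverse_left (pvDiffWitness_traverse_left.1) (pvDiffWitness_traverse_left.2) = pvDiffWitnessOut_traverse_left.1 ∧ traverse_left_alt (pvDiffWitness_traverse_left.1) (pvDiffWitness_traverse_left.2) = pvDiffWitnessOut_traverse_left.2 ∧ pvDiffWitnessOut_traverse_left.1 ≠ pvDiffWitnessOut_traverse_left.2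

-- ===== LEMMAS AND PROOFS =====
theorem pvFold_le_iff (l : List (Int × Bool)) (f : Int → Int) (a c : Int) :
    l.foldl (fun b jd => if jd.2 = false then max b (f jd.1) else b) a ≤ c ↔
      a ≤ c ∧ ∀ jd ∈ l, jd.2 = false → f jd.1 ≤ c := by
  induction l generalizing a with
  | nil =>
    constructor
    · intro h; exact ⟨h, fun jd hm => absurd hm (List.not_mem_nil)⟩
    · rintro ⟨h, _⟩; exact h
  | cons hd tl ih =>
    rw [List.foldl_cons, ih]
    by_cases hh : hd.2 = false
    · rw [if_pos hh]
      constructor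
      · rintro ⟨h1, h2⟩
        refine ⟨(max_le_iff.mp h1).1, fun jd hm hf => ?_⟩
        rcases List.mem_cons.mp hm with h | h
        · subst h; exact (max_le_iff.mp h1).2
        · exact h2 jd h hf
      · rintro ⟨h1, h2⟩
        exact ⟨max_le_iff.mpr ⟨h1, h2 hd (List.mem_cons_self) hh⟩,
          fun jd hm hf => h2 jd (List.mem_cons_of_mem _ hm) hf⟩
    · rw [if_neg hh]
      constructor
      · rintro ⟨h1, h2⟩
        refine ⟨h1, fun jd hm hf => ?_⟩
        rcases List.mem_cons.mp hm with h | h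
        · subst h; exact absurd hf hh
        · exact h2 jd h hf
      · rintro ⟨h1, h2⟩
        exact ⟨h1, fun jd hm hf => h2 jd (List.mem_cons_of_mem _ hm) hf⟩

theorem pvFold_ge_init (l : List (Int × Bool)) (f : Int → Int) (a : Int) :
    a ≤ l.foldl (fun b jd => if jd.2 = false then max b (f jd.1) else b) a := by
  induction l generalizing a with
  | nil => simp
  | cons hd tl ih =>
    simp only [List.foldl_cons]
    split
    · exact le_trans (le_max_left a _) (ih _)
    · exact ih a

theorem pvFold_ge_mem (l : List (Int × Bool)) (f : Int → Int) (a : Int)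
    (jd : Int × Bool) (hm : jd ∈ l) (hf : jd.2 = false) :
    f jd.1 ≤ l.foldl (fun b jd => if jd.2 = false then max b (f jd.1) else b) a := by
  induction l generalizing a with
  | nil => exact absurd hm (List.not_mem_nil)
  | cons hd tl ih =>
    simp only [List.foldl_cons]
    rcases List.mem_cons.mp hm with h | h
    · subst h; rw [if_pos hf]
      exact le_trans (le_max_right a _) (pvFold_ge_init tl f _)
    · split
      · exact ih _ h
      · exact ih a h


theorem pvGetBang (l : List Bool) (j : Nat) (h : j < l.length) : l[j]! = l[j] := by
  simp [List.getElem!_eq_getElem?_getD, List.getElem?_eq_getElem h]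

theorem pvStep_emod (N i k : Int) (_hN : 0 < N) (h0 : 0 ≤ i) (hi : i < N) :
    ((if i > 0 then i - 1 else N - 1) - k) % N = (i - (k+1)) % N := by
  split
  · ring_nf
  · have hz : i = 0 := by omega
    subst hz
    rw [show (N - 1 - k) = (0 - (k+1)) + N * 1 by ring, Int.add_mul_emod_self_left]

theorem pvInv (N a b : Int) : (a - (a - b) % N) % N = b % N := by
  calc (a - (a - b) % N) % N
      = (a % N - (a - b) % N % N) % N := Int.sub_emod ..
    _ = (a % N - (a - b) % N) % N := by rw [Int.emod_emod_of_dvd _ dvd_rfl]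
    _ = (a - (a - b)) % N := by rw [← Int.sub_emod]
    _ = b % N := by ring_nf

theorem pvLoop_spec (done : List Bool) (hn : 0 < done.length) :
    ∀ (f : Nat) (i cnt : Int), 0 ≤ i → i < (done.length : Int) →
    ((pvLoopA done f i cnt).2 = cnt + f ∧
       ∀ k : Nat, k < f → done[((i - k) % (done.length : Int)).toNat]! = true)
    ∨ (∃ s : Nat, s < f ∧
         pvLoopA done f i cnt = ((i - s) % (done.length : Int), cnt + s) ∧
         done[((i - s) % (done.length : Int)).toNat]! = false ∧
         ∀ t : Nat, t < s → done[((i - t) % (done.length : Int)).toNat]! = true) := by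
  intro f
  induction f with
  | zero =>
    intro i cnt h0 hi
    left
    exact ⟨by simp [pvLoopA], fun k hk => absurd hk (Nat.not_lt_zero k)⟩
  | succ f ih =>
    intro i cnt h0 hi
    have hg := PySem.List.pyGet?_eq_some_getElem done h0 hi
    have hii : (i % (done.length : Int)) = i := Int.emod_eq_of_lt h0 hi
    by_cases hb : done[i.toNat]! = false
    · -- break immediately: s = 0
      right
      refine ⟨0, Nat.succ_pos f, ?_, ?_, fun t ht => absurd ht (Nat.not_lt_zero t)⟩
      · simp only [pvLoopA, hg]
        rw [pvGetBang done i.toNat (by omega)] at hb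
        simp [hb, hii]
      · simpa [hii] using hb
    · -- done[i] = true: step
      have hbt : done[i.toNat] = true := by
        rw [pvGetBang done i.toNat (by omega)] at hb
        exact Bool.not_eq_false _ |>.mp hb
      have hstep : pvLoopA done (f+1) i cnt
          = pvLoopA done f (if i > 0 then i - 1 else (done.length : Int) - 1) (cnt + 1) := by
        simp only [pvLoopA, hg, hbt]
        simp
      set i' := (if i > 0 then i - 1 else (done.length : Int) - 1) with hi'
      have h0' : 0 ≤ i' := by rw [hi']; split <;> omega
      have hi'' : i' < (done.length : Int) := by rw [hi']; split <;> omega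
      have hsh : ∀ k : Int, ((i' - k) % (done.length : Int)) = (i - (k+1)) % (done.length : Int) := by
        intro k; rw [hi']; exact pvStep_emod _ i k (by exact_mod_cast hn) h0 hi
      have hzero : done[((i - ((0:Nat):Int)) % (done.length : Int)).toNat]! = true := by
        simp only [Nat.cast_zero, sub_zero, hii]
        rw [pvGetBang done i.toNat (by omega)]; exact hbt
      rcases ih i' (cnt + 1) h0' hi'' with ⟨hsnd, hall⟩ | ⟨s, hs, heq, hfalse, hmin⟩
      · left
        constructor
        · rw [hstep, hsnd]; push_cast; ring
        · intro k hk
          cases k with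
          | zero => exact hzero
          | succ t =>
            have hthis := hall t (by omega)
            rw [hsh t] at hthis
            have hcast : ((t+1 : Nat) : Int) = (t : Int) + 1 := by push_cast; ring
            rw [hcast]; exact hthis
      · right
        have hcast : ((s+1 : Nat) : Int) = (s : Int) + 1 := by push_cast; ring
        refine ⟨s+1, by omega, ?_, ?_, ?_⟩
        · rw [hstep, heq, hsh s, hcast]
          simp only [Prod.mk.injEq]
          exact ⟨True.intro, by ring⟩
        · have hthis := hfalse; rw [hsh s] at hthis
          rw [hcast]; exact hthis
        · intro t ht
          cases t with
          | zero => exact hzero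
          | succ u =>
            have hthis := hmin u (by omega)
            rw [hsh u] at hthis
            have hcast2 : ((u+1 : Nat) : Int) = (u : Int) + 1 := by push_cast; ring
            rw [hcast2]; exact hthis


theorem pvAlt_eq_fold (done : List Bool) (i : Int) (hn : 0 < done.length) :
    traverse_left_alt done i = (PySem.List.enumerate done 0).foldl
      (fun b jd => if jd.2 = false then max b ((i - jd.1) % (done.length : Int)) else b) 0 := by
  have hne : ((done.length : Int)) ≠ 0 := by exact_mod_cast hn.ne'
  simp only [traverse_left_alt, if_neg hne]
  congr 1
  funext b jd
  rw [PySem.Int.mod_eq_emod_of_pos (by exact_mod_cast hn)]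

theorem pvAlt_nonneg (done : List Bool) (i : Int) (hn : 0 < done.length) :
    0 ≤ traverse_left_alt done i := by
  rw [pvAlt_eq_fold done i hn]
  exact pvFold_ge_init _ (fun j => (i - j) % (done.length : Int)) 0

theorem pvAlt_ge (done : List Bool) (i : Int) (hn : 0 < done.length)
    (k : Nat) (hk : k < done.length) (hf : done[k]! = false) :
    (i - k) % (done.length : Int) ≤ traverse_left_alt done i := by
  rw [pvAlt_eq_fold done i hn]
  have hm : ((k : Int), false) ∈ PySem.List.enumerate done 0 := by
    rw [PySem.List.mem_enumerate_iff]
    refine ⟨k, hk, ?_⟩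
    rw [pvGetBang done k hk] at hf
    simp [hf]
  exact pvFold_ge_mem _ (fun j => (i - j) % (done.length : Int)) 0 ((k : Int), false) hm rfl

theorem pvAlt_le (done : List Bool) (i : Int) (hn : 0 < done.length) (c : Int)
    (hc0 : 0 ≤ c)
    (hall : ∀ k : Nat, k < done.length → done[k]! = false → (i - k) % (done.length : Int) ≤ c) :
    traverse_left_alt done i ≤ c := by
  rw [pvAlt_eq_fold done i hn]
  rw [pvFold_le_iff _ (fun j => (i - j) % (done.length : Int))]
  refine ⟨hc0, ?_⟩
  intro jd hm hf
  rw [PySem.List.mem_enumerate_iff] at hm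
  obtain ⟨k, hk, hp⟩ := hm
  subst hp
  simp only [zero_add]
  have : done[k]! = false := by rw [pvGetBang done k hk]; simpa using hf
  exact hall k hk this

theorem pvKey (done : List Bool) (hn : 0 < done.length) (i : Int)
    (h0 : 0 ≤ i) (hi : i < (done.length : Int)) (s : Nat) (hs : s < done.length)
    (hmin : ∀ t : Nat, t < s → done[((i - t) % (done.length : Int)).toNat]! = true)
    (k : Nat) (hk : k < done.length) (hf : done[k]! = false) :
    (i - k) % (done.length : Int)
      = s + (((i - s) % (done.length : Int)) - k) % (done.length : Int) := by
  have hN : 0 < (done.length : Int) := by exact_mod_cast hn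
  have hkk : (k : Int) % (done.length : Int) = k := Int.emod_eq_of_lt (by positivity) (by exact_mod_cast hk)
  -- minimality in distance form: s ≤ (i - k) % N
  have hge : (s : Int) ≤ (i - k) % (done.length : Int) := by
    by_contra hlt
    push_neg at hlt
    have hnn : 0 ≤ (i - k) % (done.length : Int) := Int.emod_nonneg _ hN.ne'
    have htlt : ((i - k) % (done.length : Int)).toNat < s := by omega
    have hpt := hmin _ htlt
    have htc : ((((i - k) % (done.length : Int)).toNat : Int)) = (i - k) % (done.length : Int) := by omega
    rw [htc, pvInv, hkk] at hpt
    simp only [Int.toNat_natCast] at hpt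
    rw [hf] at hpt
    exact Bool.false_ne_true hpt
  -- congruence
  have h1 : (((i - s) % (done.length : Int)) - k) % (done.length : Int)
      = ((i - s) - k) % (done.length : Int) := by
    rw [Int.sub_emod, Int.emod_emod_of_dvd _ dvd_rfl, ← Int.sub_emod]
  have hcong : ((s : Int) + (((i - s) % (done.length : Int)) - k) % (done.length : Int))
      % (done.length : Int) = (i - k) % (done.length : Int) := by
    rw [h1, Int.add_emod, Int.emod_emod_of_dvd _ dvd_rfl, ← Int.add_emod]
    ring_nf
  set B := (((i - s) % (done.length : Int)) - k) % (done.length : Int) with hB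
  have hB0 : 0 ≤ B := Int.emod_nonneg _ hN.ne'
  have hBlt : B < (done.length : Int) := Int.emod_lt_of_pos _ hN
  have hA0 : 0 ≤ (i - k) % (done.length : Int) := Int.emod_nonneg _ hN.ne'
  have hAlt : (i - k) % (done.length : Int) < (done.length : Int) := Int.emod_lt_of_pos _ hN
  have hsN : (s : Int) < (done.length : Int) := by exact_mod_cast hs
  rcases lt_or_ge ((s : Int) + B) (done.length : Int) with hlt2 | hge2
  · rw [Int.emod_eq_of_lt (by omega) hlt2] at hcong; omega
  · exfalso
    have h2 : ((s : Int) + B) % (done.length : Int)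
        = ((s : Int) + B - (done.length : Int)) % (done.length : Int) := (Int.sub_emod_right _ _).symm
    rw [h2, Int.emod_eq_of_lt (by omega) (by omega)] at hcong
    omega

theorem pvAlt_step (done : List Bool) (hn : 0 < done.length) (i : Int)
    (h0 : 0 ≤ i) (hi : i < (done.length : Int)) (s : Nat) (hs : s < done.length)
    (hfalse : done[((i - s) % (done.length : Int)).toNat]! = false)
    (hmin : ∀ t : Nat, t < s → done[((i - t) % (done.length : Int)).toNat]! = true) :
    traverse_left_alt done i
      = s + traverse_left_alt (done.set ((i - s) % (done.length : Int)).toNat true)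
          ((i - s) % (done.length : Int)) := by
  have hN : 0 < (done.length : Int) := by exact_mod_cast hn
  set j0 : Int := (i - s) % (done.length : Int) with hj0
  have hj00 : 0 ≤ j0 := Int.emod_nonneg _ hN.ne'
  have hj0lt : j0 < (done.length : Int) := Int.emod_lt_of_pos _ hN
  set j0n : Nat := j0.toNat with hj0n
  have hj0nc : ((j0n : Nat) : Int) = j0 := by omega
  have hj0nlt : j0n < done.length := by omega
  set done' := done.set j0n true with hdone'
  have hlen' : done'.length = done.length := List.length_set
  have hn' : 0 < done'.length := by omega
  -- done'[k]! for k ≠ j0n equals done[k]!, and done'[j0n]! = true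
  have hget' : ∀ k : Nat, k ≠ j0n → done'[k]! = done[k]! := by
    intro k hkne
    simp [hdone', List.getElem!_eq_getElem?_getD, List.getElem?_set_ne (Ne.symm hkne)]
  have hgetj : done'[j0n]! = true := by
    simp [hdone', List.getElem!_eq_getElem?_getD, List.getElem?_set_self hj0nlt]
  -- s ≤ alt done i
  have hs_le : (s : Int) ≤ traverse_left_alt done i := by
    have hgee := pvAlt_ge done i hn j0n hj0nlt hfalse
    have hkey := pvKey done hn i h0 hi s hs hmin j0n hj0nlt hfalse
    rw [hj0nc] at hkey hgee
    rw [← hj0] at hkey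
    rw [hkey] at hgee
    simpa using hgee
  apply le_antisymm
  · -- alt done i ≤ s + alt done' j0
    apply pvAlt_le done i hn _ (by have := pvAlt_nonneg done' j0 hn'; omega)
    intro k hk hf
    have hkey := pvKey done hn i h0 hi s hs hmin k hk hf
    rw [← hj0] at hkey
    rw [hkey]
    by_cases hkj : k = j0n
    · subst hkj
      rw [hj0nc]
      simp only [sub_self, Int.zero_emod]
      have := pvAlt_nonneg done' j0 hn'
      omega
    · have hf' : done'[k]! = false := by rw [hget' k hkj]; exact hf
      have hge2 := pvAlt_ge done' j0 hn' k (by omega) hf'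
      rw [hlen'] at hge2
      omega
  · -- s + alt done' j0 ≤ alt done i
    have h1 : traverse_left_alt done' j0 ≤ traverse_left_alt done i - s := by
      apply pvAlt_le done' j0 hn' _ (by omega)
      intro k hk' hf'
      have hk : k < done.length := by omega
      have hkne : k ≠ j0n := by
        intro hkk; rw [hkk, hgetj] at hf'; exact absurd hf' (by simp)
      have hf : done[k]! = false := by rw [← hget' k hkne]; exact hf'
      have hkey := pvKey done hn i h0 hi s hs hmin k hk hf
      rw [← hj0] at hkey
      have hge := pvAlt_ge done i hn k hk hf
      rw [hlen']
      omega
    omega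

theorem pvMain : ∀ (c : Nat) (done : List Bool) (i : Int), done.count false = c →
    0 ≤ i → i < (done.length : Int) → traverse_left done i = traverse_left_alt done i := by
  intro c
  induction c using Nat.strong_induction_on with
  | _ c ihc =>
    intro done i hc h0 hi
    have hn : 0 < done.length := by
      by_contra hz
      have : done.length = 0 := by omega
      rw [this] at hi
      omega
    have hN : 0 < (done.length : Int) := by exact_mod_cast hn
    rw [traverse_left]
    rcases pvLoop_spec done hn done.length i 0 h0 hi with ⟨hsnd, hall⟩ | ⟨s, hs, heq, hfalse, hmin⟩
    · -- no False on the circle: A returns 0, alt is 0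
      have hcond : (pvLoopA done done.length i 0).2 = (done.length : Int) := by
        rw [hsnd]; ring
      simp only [hcond, if_pos rfl]
      have hallt : ∀ k : Nat, k < done.length → done[k]! = true := by
        intro j hj
        have hjN : ((i - j) % (done.length : Int)).toNat < done.length := by
          have h1 := Int.emod_nonneg (i - j) hN.ne'
          have h2 := Int.emod_lt_of_pos (i - j) hN
          omega
        have := hall _ hjN
        have hcast : ((((i - j) % (done.length : Int)).toNat : Nat) : Int)
            = (i - j) % (done.length : Int) := by
          have h1 := Int.emod_nonneg (i - j) hN.ne'
          omega
        rw [hcast, pvInv] at this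
        have hjj : (j : Int) % (done.length : Int) = j :=
          Int.emod_eq_of_lt (by positivity) (by exact_mod_cast hj)
        rw [hjj] at this
        simpa using this
      symm
      apply le_antisymm
      · apply pvAlt_le done i hn 0 le_rfl
        intro k hk hf
        rw [hallt k hk] at hf
        exact absurd hf (by simp)
      · exact pvAlt_nonneg done i hn
    · -- found the nearest False after s steps
      have hsnd : (pvLoopA done done.length i 0).2 = (s : Int) := by rw [heq]; simp
      have hfst : (pvLoopA done done.length i 0).1 = (i - s) % (done.length : Int) := by
        rw [heq]
      have hcond : ¬ ((pvLoopA done done.length i 0).2 = (done.length : Int)) := by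
        rw [hsnd]
        intro hcc
        have : s = done.length := by exact_mod_cast hcc
        omega
      simp only [if_neg hcond]
      rw [hfst, hsnd]
      have hj00 : 0 ≤ (i - s) % (done.length : Int) := Int.emod_nonneg _ hN.ne'
      have hj0lt : (i - s) % (done.length : Int) < (done.length : Int) := Int.emod_lt_of_pos _ hN
      rw [if_neg (by omega)]
      set j0n : Nat := ((i - s) % (done.length : Int)).toNat with hj0n
      have hj0nc : ((j0n : Nat) : Int) = (i - s) % (done.length : Int) := by omega
      have hj0nlt : j0n < done.length := by omega
      -- recursive call via the induction hypothesis
      have hdec : (done.set j0n true).count false < c := by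
        rw [← hc]
        exact pvCount_set_lt done j0n hj0nlt hfalse
      have hrec := ihc _ hdec (done.set j0n true) ((i - s) % (done.length : Int)) rfl hj00
        (by rw [List.length_set]; omega)
      rw [hrec]
      have hstep := pvAlt_step done hn i h0 hi s hs hfalse hmin
      rw [hstep]


theorem pvAllTrue_get (done : List Bool) (h : ∀ x ∈ done, x = true)
    (k : Nat) (hk : k < done.length) : done[k]! = true := by
  rw [pvGetBang done k hk]
  exact h _ (List.getElem_mem hk)

theorem pvLoop_alltrue (done : List Bool) (h : ∀ x ∈ done, x = true) :
    ∀ (f : Nat) (i cnt : Int), (pvLoopA done f i cnt).2 = cnt + f := by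
  intro f
  induction f with
  | zero => intro i cnt; simp [pvLoopA]
  | succ f ih =>
    intro i cnt
    simp only [pvLoopA]
    cases hg : PySem.List.pyGet? done i with
    | none => simp
    | some b =>
      have hb : b = true := h b (PySem.List.mem_of_pyGet?_eq_some _ hg)
      rw [hb]
      simp only [Bool.true_eq_false, if_false]
      rw [ih]
      push_cast; ring

theorem pvA_zero_of_alltrue (done : List Bool) (i : Int) (h : ∀ x ∈ done, x = true) :
    traverse_left done i = 0 := by
  rw [traverse_left]
  rw [if_pos (by rw [pvLoop_alltrue done h]; ring)]

theorem pvAlt_zero_of_alltrue (done : List Bool) (i : Int) (h : ∀ x ∈ done, x = true) :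
    traverse_left_alt done i = 0 := by
  rcases Nat.eq_zero_or_pos done.length with hz | hn
  · simp [traverse_left_alt, hz]
  · apply le_antisymm
    · apply pvAlt_le done i hn 0 le_rfl
      intro k hk hf
      rw [pvAllTrue_get done h k hk] at hf
      exact absurd hf (by simp)
    · exact pvAlt_nonneg done i hn

theorem pvGet_negn (done : List Bool) (hn : 0 < done.length) :
    PySem.List.pyGet? done (-(done.length : Int)) = PySem.List.pyGet? done 0 := by
  unfold PySem.List.pyGet? PySem.List.pyIdx?
  have h1 : ¬ ((0:Int) ≤ -(done.length : Int)) := by omega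
  rw [if_neg h1, if_pos (by omega), if_pos (by omega), if_pos (by exact_mod_cast hn)]
  norm_num

theorem pvLoopA_negn (done : List Bool) (hn : 0 < done.length) :
    ∀ (f : Nat) (cnt : Int),
      pvLoopA done f (-(done.length : Int)) cnt = pvLoopA done f 0 cnt ∨
      (∃ c, pvLoopA done f (-(done.length : Int)) cnt = (-(done.length : Int), c) ∧
            pvLoopA done f 0 cnt = (0, c)) := by
  intro f cnt
  cases f with
  | zero => right; exact ⟨cnt, rfl, rfl⟩
  | succ f =>
    simp only [pvLoopA, pvGet_negn done hn]
    cases hg : PySem.List.pyGet? done 0 with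
    | none => right; simp only [hg]; exact ⟨cnt + (f+1), rfl, rfl⟩
    | some b =>
      simp only [hg]
      by_cases hb : b = false
      · right; simp only [if_pos hb]; exact ⟨cnt, rfl, rfl⟩
      · left
        have h1 : ¬ ((-(done.length : Int)) > 0) := by omega
        have h2 : ¬ ((0:Int) > 0) := by omega
        simp only [if_neg hb, if_neg h1, if_neg h2]

theorem pvA_negn : ∀ (c : Nat) (done : List Bool), done.count false = c → 0 < done.length →
    traverse_left done (-(done.length : Int)) = traverse_left done 0 := by
  intro c
  induction c using Nat.strong_induction_on with
  | _ c ihc =>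
    intro done hc hn
    rw [traverse_left, traverse_left]
    rcases pvLoopA_negn done hn done.length 0 with heq | ⟨cc, h1, h2⟩
    · rw [heq]
    · rw [h1, h2]
      by_cases hcn : cc = (done.length : Int)
      · simp [hcn]
      · simp only [if_neg hcn]
        have hstop := pvLoopA_stop done done.length (-(done.length : Int)) 0
          (by rw [h1]; simpa using hcn)
        rw [h1] at hstop
        simp only at hstop
        rw [pvGet_negn done hn] at hstop
        have hw := pvWrap_lt done 0 (by simpa using hstop)
        simp only [if_neg (by omega : ¬ ((0:Int) < 0)), Int.toNat_zero] at hw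
        have hj1 : (if (-(done.length : Int)) < 0 then (-(done.length : Int)) + done.length else (-(done.length : Int))).toNat = 0 := by
          rw [if_pos (by omega)]; omega
        have hj2 : (if (0:Int) < 0 then (0:Int) + done.length else 0).toNat = 0 := by
          rw [if_neg (by omega)]; rfl
        rw [hj1, hj2]
        have hdec : (done.set 0 true).count false < c := by
          rw [← hc]; exact pvCount_set_lt done 0 hw.1 hw.2
        have hlen : (done.set 0 true).length = done.length := List.length_set
        have := ihc _ hdec (done.set 0 true) rfl (by omega)
        rw [hlen] at this
        rw [this]

theorem pvAlt_negn (done : List Bool) (hn : 0 < done.length) :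
    traverse_left_alt done (-(done.length : Int)) = traverse_left_alt done 0 := by
  rw [pvAlt_eq_fold done _ hn, pvAlt_eq_fold done _ hn]
  congr 1
  funext b jd
  have : ((-(done.length : Int)) - jd.1) % (done.length : Int) = ((0:Int) - jd.1) % (done.length : Int) := by
    rw [show ((-(done.length : Int)) - jd.1) = ((0:Int) - jd.1) + (done.length : Int) * (-1) by ring,
      Int.add_mul_emod_self_left]
  rw [this]

theorem pvNoOff (done : List Bool) (i : Int) (hn : 0 < done.length)
    (hi1 : -(done.length : Int) < i) (hi2 : i < 0)
    (hno : ∀ k : Nat, k < done.length → done[k]! = false → (k : Int) = i + done.length) :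
    traverse_left done i = traverse_left_alt done i := by
  by_cases hall : ∀ x ∈ done, x = true
  · rw [pvA_zero_of_alltrue done i hall, pvAlt_zero_of_alltrue done i hall]
  · push_neg at hall
    obtain ⟨x, hxm, hxf⟩ := hall
    obtain ⟨k, hk, hkx⟩ := List.mem_iff_getElem.mp hxm
    have hxfalse : x = false := by
      cases x
      · rfl
      · exact absurd rfl hxf
    have hkf : done[k]! = false := by rw [pvGetBang done k hk, hkx, hxfalse]
    have hkiw := hno k hk hkf
    have hpg : PySem.List.pyGet? done i = some false := by
      unfold PySem.List.pyGet? PySem.List.pyIdx?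
      rw [if_neg (by omega), if_pos (by omega)]
      simp only [Option.bind_some]
      rw [show done.length - (-i).toNat = k by omega, List.getElem?_eq_getElem hk, hkx, hxfalse]
    obtain ⟨m, hm⟩ : ∃ m, done.length = m + 1 := ⟨done.length - 1, by omega⟩
    have hloop : pvLoopA done done.length i 0 = (i, 0) := by
      rw [hm]
      simp [pvLoopA, hpg]
    rw [traverse_left]
    simp only [hloop]
    rw [if_neg (by omega)]
    rw [if_pos hi2]
    have hset_all : ∀ x' ∈ done.set (i + done.length).toNat true, x' = true := by
      intro x' hx'
      obtain ⟨k', hk', hkx'⟩ := List.mem_iff_getElem.mp hx'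
      rw [List.length_set] at hk'
      by_cases hkj : k' = (i + done.length).toNat
      · subst hkj
        rw [List.getElem_set_self] at hkx'
        exact hkx'.symm
      · rw [List.getElem_set_ne (by omega)] at hkx'
        by_contra hxt
        have hxfalse' : x' = false := by cases x' with | false => rfl | true => exact absurd rfl hxt
        have : done[k']! = false := by rw [pvGetBang done k' hk', hkx', hxfalse']
        have := hno k' hk' this
        omega
    rw [pvA_zero_of_alltrue _ _ hset_all]
    have halt0 : traverse_left_alt done i = 0 := by
      apply le_antisymm
      · apply pvAlt_le done i hn 0 le_rfl
        intro k' hk' hf'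
        have hkeq := hno k' hk' hf'
        rw [show i - (k' : Int) = (-1) * (done.length : Int) by omega]
        rw [Int.mul_emod_left]
      · exact pvAlt_nonneg done i hn
    rw [halt0]
    ring

-- ===== VERDICT (by name: the statement is the Claim_ definition above) =====
theorem traverse_left_spec : Claim_unchanged_traverse_left := by
  intro done i _ hpre
  unfold Spec_traverse_left
  intro hnd
  rcases hpre with h | ⟨h1, h2⟩
  · subst h
    rw [traverse_left]
    simp [pvLoopA, traverse_left_alt]
  · have hn : 0 < done.length := by
      by_contra hz
      have : done.length = 0 := by omega
      omega
    by_cases h0 : (0:Int) ≤ i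
    · exact pvMain _ done i rfl h0 h2
    · have hneg : i < 0 := by omega
      rcases eq_or_lt_of_le h1 with heq | hlt
      · rw [← heq]
        calc traverse_left done (-(done.length : Int))
            = traverse_left done 0 := pvA_negn _ done rfl hn
          _ = traverse_left_alt done 0 := pvMain _ done 0 rfl le_rfl (by exact_mod_cast hn)
          _ = traverse_left_alt done (-(done.length : Int)) := (pvAlt_negn done hn).symm
      · apply pvNoOff done i hn hlt hneg
        intro k hk hf
        by_contra hne
        exact hnd ⟨hlt, hneg, k, hk, hf, hne⟩

theorem traverse_left_changed : Claim_changed_traverse_left := by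
  unfold Claim_changed_traverse_left
  refine ⟨by decide, by decide, by decide, ?_, by decide, by decide⟩
  show traverse_left [false, true] (-1) = (0 : Int)
  rw [traverse_left]
  norm_num [pvLoopA, PySem.List.pyGet?, PySem.List.pyIdx?]
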